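-- pv_equiv track=rewrite | github.com/junchenzhu1107-commits/homework-in-UB-first-year | main-week-11.py | createFactorRows
-- ===== SOURCE A (Python) =====
-- def createFactorRows(r):
--     if r==0:
--         return []
--     else:
--         outlist=[]
--         for how_many in range(r):
--             inlist=[]
--             for devisible in range(how_many+1):
--                 if (how_many+1) % (devisible+1)==0:
--                     inlist.append(1)
--                 else:
--                     inlist.append(0)
--             outlist.append(inlist)
--     return outlist
-- ===== SOURCE B (Python) =====
-- def createFactorRows(r):
--     # Sieve: build zero-filled triangular rows, then mark multiples of each divisor.
--     rows = [[0] * (i + 1) for i in range(r)]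
--     for d in range(1, r + 1):
--         for n in range(d, r + 1, d):
--             rows[n - 1][d - 1] = 1
--     return rows
-- ===== Notes on version B (the rewrite author's own statement) =====
-- stated objective: alternative
-- what changed: Replaces the per-cell modulo test with a sieve: zero-filled triangular rows are built first, then each divisor d marks its multiples' cells, touching only O(r log r) cells instead of testing all O(r^2).
import Mathlib
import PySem

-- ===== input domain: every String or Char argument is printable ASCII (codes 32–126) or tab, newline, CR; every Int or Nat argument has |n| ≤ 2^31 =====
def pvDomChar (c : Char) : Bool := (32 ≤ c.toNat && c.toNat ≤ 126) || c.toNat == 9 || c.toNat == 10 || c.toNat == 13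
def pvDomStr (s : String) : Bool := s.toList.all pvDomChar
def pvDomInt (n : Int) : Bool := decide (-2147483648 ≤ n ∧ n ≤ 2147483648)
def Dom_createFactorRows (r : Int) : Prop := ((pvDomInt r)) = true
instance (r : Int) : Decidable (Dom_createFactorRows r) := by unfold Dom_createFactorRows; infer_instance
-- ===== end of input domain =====

-- B replaces the per-cell modulo test with a sieve that marks each divisor's multiples
-- in pre-built zero rows (alternative decomposition; return values proved equal).

-- ===== PORT A =====
def createFactorRows (r : Int) : List (List Int) :=
  if r == 0 then []
  else
    (PySem.List.pyRange 0 r 1).foldl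
      (fun outlist how_many =>
        outlist ++ [(PySem.List.pyRange 0 (how_many + 1) 1).foldl
          (fun inlist devisible =>
            if PySem.Int.mod (how_many + 1) (devisible + 1) == 0 then inlist ++ [1]
            else inlist ++ [0]) []])
      []

-- ===== PORT B =====
-- rows[i][j] = v (Python list assignment); exact for the indices B uses, which
-- always satisfy 0 ≤ j ≤ i < len rows.
def setCell (rows : List (List Int)) (i j v : Int) : List (List Int) :=
  rows.set i.toNat ((rows.getD i.toNat []).set j.toNat v)

def createFactorRows_alt (r : Int) : List (List Int) :=
  let rows := (PySem.List.pyRange 0 r 1).map (fun i => List.replicate (i + 1).toNat 0)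
  (PySem.List.pyRange 1 (r + 1) 1).foldl
    (fun rows d =>
      (PySem.List.pyRange d (r + 1) d).foldl
        (fun rows n => setCell rows (n - 1) (d - 1) 1) rows)
    rows

-- ===== PRECONDITION & SPEC =====
def Spec_createFactorRows (r : Int) (out : List (List Int)) : Prop := out = createFactorRows_alt r
instance (r : Int) (out : List (List Int)) : Decidable (Spec_createFactorRows r out) := by unfold Spec_createFactorRows; infer_instance

-- ===== CLAIM (what is proved, stated in full; the proofs are below) =====
def Claim_equal_createFactorRows : Prop := ∀ (r : Int), Dom_createFactorRows r → Spec_createFactorRows r (createFactorRows r)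

-- ===== LEMMAS AND PROOFS =====

-- row of the final matrix, with divisors up to d marked
def Frow (d i : Nat) : List Int :=
  (List.range (i + 1)).map (fun (j : Nat) => if j < d ∧ ((j : Int) + 1) ∣ ((i : Int) + 1) then 1 else 0)

-- the sieve state after processing divisors 1..d
def SMat (m d : Nat) : List (List Int) :=
  (List.range m).map (Frow d)

theorem A_char (r : Int) :
    createFactorRows r =
      (List.range r.toNat).map (fun (i : Nat) =>
        (List.range (i + 1)).map (fun (j : Nat) =>
          if ((j : Int) + 1) ∣ ((i : Int) + 1) then (1 : Int) else 0)) := by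
  have hstep : ∀ (hm dv : Int) (inlist : List Int),
      (if PySem.Int.mod (hm + 1) (dv + 1) == 0 then inlist ++ [(1 : Int)] else inlist ++ [0])
        = inlist ++ [if (dv + 1) ∣ (hm + 1) then (1 : Int) else 0] := by
    intro hm dv inlist
    by_cases h : (dv + 1) ∣ (hm + 1)
    · rw [if_pos h, if_pos]
      simpa [PySem.Int.mod_eq_zero_iff_dvd] using h
    · rw [if_neg h, if_neg]
      simpa [PySem.Int.mod_eq_zero_iff_dvd] using h
  by_cases h0 : r = 0
  · simp [createFactorRows, h0]
  · unfold createFactorRows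
    rw [if_neg (by simpa using h0)]
    simp only [hstep, PySem.List.foldl_append_singleton_eq_map, List.nil_append]
    rw [PySem.List.pyRange_one 0 r]
    simp only [Int.sub_zero, List.map_map]
    apply List.map_congr_left
    intro k _
    simp only [Function.comp_apply, zero_add]
    have : (k : Int) + 1 = ((k + 1 : Nat) : Int) := by push_cast; ring
    rw [this, PySem.List.pyRange_one 0 ((k + 1 : Nat) : Int)]
    simp only [Int.sub_zero, Int.toNat_natCast, List.map_map]
    apply List.map_congr_left
    intro j _
    simp only [Function.comp_apply, zero_add]

theorem set_map_range {α : Type} (m : Nat) (F : Nat → α) (t : Nat) (X : α) :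
    ((List.range m).map F).set t X = (List.range m).map (fun (i : Nat) => if i = t then X else F i) := by
  apply List.ext_getElem
  · simp
  · intro i h1 h2
    simp only [List.getElem_set, List.getElem_map, List.getElem_range]
    split_ifs with h h' h' <;> first | rfl | omega

theorem mark_fold (L : List Int) (j : Nat) (m : Nat)
    (hL : ∀ n ∈ L, 1 ≤ n ∧ n ≤ (m : Int)) (F : Nat → List Int) :
    L.foldl (fun rs n => setCell rs (n - 1) (j : Int) 1) ((List.range m).map F)
      = (List.range m).map (fun (i : Nat) => if ((i : Int) + 1) ∈ L then (F i).set j 1 else F i) := by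
  induction L generalizing F with
  | nil => simp
  | cons n L ih =>
    obtain ⟨hn1, hn2⟩ := hL n (List.mem_cons_self ..)
    have hLt : ∀ x ∈ L, 1 ≤ x ∧ x ≤ (m : Int) := fun x hx => hL x (List.mem_cons_of_mem _ hx)
    set t : Nat := (n - 1).toNat with ht
    have htm : t < m := by omega
    have hset : setCell ((List.range m).map F) (n - 1) (j : Int) 1
        = (List.range m).map (fun i => if i = t then (F t).set j 1 else F i) := by
      unfold setCell
      have hj : ((j : Int)).toNat = j := Int.toNat_natCast j
      have hget : ((List.range m).map F).getD t [] = F t := by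
        rw [List.getD_eq_getElem?_getD]
        simp [htm]
      rw [← ht, hj, hget, set_map_range]
    rw [List.foldl_cons, hset, ih hLt]
    apply List.map_congr_left
    intro i hi
    simp only [List.mem_range] at hi
    by_cases hit : i = t
    · have hmem : ((i : Int) + 1) ∈ n :: L := by
        have : (i : Int) + 1 = n := by omega
        simp [this]
      rw [if_pos hmem, if_pos hit, hit]
      by_cases hL2 : ((i : Int) + 1) ∈ L
      · rw [hit] at hL2
        rw [if_pos hL2, List.set_set]
      · rw [hit] at hL2
        rw [if_neg hL2]
    · have hne : (i : Int) + 1 ≠ n := by omega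
      simp only [if_neg hit, List.mem_cons, hne, false_or]

theorem Frow_set (c i : Nat) (hdvd : ((c : Int) + 1) ∣ ((i : Int) + 1)) :
    (Frow c i).set c 1 = Frow (c + 1) i := by
  apply List.ext_getElem
  · simp [Frow]
  · intro j h1 h2
    simp only [Frow, List.getElem_set, List.getElem_map, List.getElem_range]
    by_cases hc : c = j
    · rw [if_pos hc, if_pos]
      exact ⟨by omega, by rw [← hc]; exact_mod_cast hdvd⟩
    · rw [if_neg hc]
      have : j < c ↔ j < c + 1 := by omega
      simp [this]

theorem Frow_skip (c i : Nat) (hdvd : ¬ ((c : Int) + 1) ∣ ((i : Int) + 1)) :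
    Frow c i = Frow (c + 1) i := by
  apply List.map_congr_left
  intro j _
  by_cases hc : j = c
  · subst hc
    rw [if_neg (by omega), if_neg (by exact fun h => hdvd (by exact_mod_cast h.2))]
  · have : j < c ↔ j < c + 1 := by omega
    simp [this]

theorem step_lemma (m c : Nat) :
    (PySem.List.pyRange ((c : Int) + 1) ((m : Int) + 1) ((c : Int) + 1)).foldl
      (fun rows n => setCell rows (n - 1) ((c : Int) + 1 - 1) 1) (SMat m c)
      = SMat m (c + 1) := by
  have hpos : (0 : Int) < (c : Int) + 1 := by omega
  have hj : (c : Int) + 1 - 1 = ((c : Nat) : Int) := by ring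
  rw [hj]
  unfold SMat
  rw [mark_fold _ c m (by
    intro n hn
    rw [PySem.List.mem_pyRange_iff_of_pos hpos] at hn
    omega)]
  apply List.map_congr_left
  intro i hi
  simp only [List.mem_range] at hi
  have hmem : ((i : Int) + 1) ∈ PySem.List.pyRange ((c : Int) + 1) ((m : Int) + 1) ((c : Int) + 1)
      ↔ ((c : Int) + 1) ∣ ((i : Int) + 1) := by
    rw [PySem.List.mem_pyRange_iff_of_pos hpos]
    constructor
    · rintro ⟨h1, h2, h3⟩
      have : (i : Int) + 1 = ((i : Int) + 1 - ((c : Int) + 1)) + ((c : Int) + 1) := by ring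
      rw [this]
      exact dvd_add h3 dvd_rfl
    · intro h
      refine ⟨Int.le_of_dvd (by omega) h, by omega, ?_⟩
      exact dvd_sub h dvd_rfl
  simp only [hmem]
  by_cases hdvd : ((c : Int) + 1) ∣ ((i : Int) + 1)
  · rw [if_pos hdvd, Frow_set c i hdvd]
  · rw [if_neg hdvd, Frow_skip c i hdvd]

theorem outer_aux (m k : Nat) : ∀ c : Nat, c + k = m →
    (PySem.List.pyRange ((c : Int) + 1) ((m : Int) + 1) 1).foldl
      (fun rows d => (PySem.List.pyRange d ((m : Int) + 1) d).foldl
        (fun rows n => setCell rows (n - 1) (d - 1) 1) rows) (SMat m c)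
      = SMat m m := by
  induction k with
  | zero =>
    intro c hc
    have : c = m := by omega
    subst this
    rw [PySem.List.pyRange_one_eq_nil (by omega)]
    rfl
  | succ k ih =>
    intro c hc
    rw [PySem.List.pyRange_one_cons (by omega), List.foldl_cons, step_lemma m c]
    have hcast : (c : Int) + 1 + 1 = ((c + 1 : Nat) : Int) + 1 := by push_cast; ring
    rw [hcast]
    exact ih (c + 1) (by omega)

theorem B_char (r : Int) (hr : 0 ≤ r) :
    createFactorRows_alt r = SMat r.toNat r.toNat := by
  set m : Nat := r.toNat with hm
  have hrm : r = (m : Int) := by omega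
  unfold createFactorRows_alt
  have hinit : (PySem.List.pyRange 0 r 1).map (fun i => List.replicate (i + 1).toNat 0)
      = SMat m 0 := by
    rw [PySem.List.pyRange_one 0 r]
    simp only [Int.sub_zero, ← hm, List.map_map]
    apply List.map_congr_left
    intro i _
    simp only [Function.comp_apply, zero_add]
    have : ((i : Int) + 1).toNat = i + 1 := by omega
    rw [this]
    unfold Frow
    apply List.ext_getElem
    · simp
    · intro j h1 h2
      simp
  rw [hinit]
  have h1 : (1 : Int) = ((0 : Nat) : Int) + 1 := by norm_num
  rw [hrm, h1]
  exact outer_aux m m 0 (by omega)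

theorem SMat_final (m : Nat) :
    SMat m m = (List.range m).map (fun (i : Nat) =>
      (List.range (i + 1)).map (fun (j : Nat) =>
        if ((j : Int) + 1) ∣ ((i : Int) + 1) then (1 : Int) else 0)) := by
  apply List.map_congr_left
  intro i hi
  simp only [List.mem_range] at hi
  apply List.map_congr_left
  intro j hj
  simp only [List.mem_range] at hj
  have : j < m := by omega
  simp [this]

-- ===== VERDICT (by name: the statement is the Claim_ definition above) =====
theorem createFactorRows_spec : Claim_equal_createFactorRows := by
  intro r _
  unfold Spec_createFactorRows
  rcases le_or_gt 0 r with hr | hr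
  · rw [A_char, B_char r hr, SMat_final]
  · rw [A_char]
    have h1 : r.toNat = 0 := by omega
    have h2 : r + 1 ≤ 1 := by omega
    have h3 : r ≤ 0 := by omega
    simp [createFactorRows_alt, PySem.List.pyRange_one_eq_nil h3,
      PySem.List.pyRange_one_eq_nil h2, h1]
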